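-- pv_equiv track=rewrite | github.com/assignments-for-discussion/count-by-cycles-in-python-udayvn | main.py | count_batteries_by_usage
-- ===== SOURCE A (Python) =====
-- def count_batteries_by_usage(cycles):
--   l =0
--   m =0
--   h =0
--   for i in cycles:
--     if i < 150:
--       l = l+1
--     if i >150 :
--       if i<649:
--         m = m+1
--     if i>650:
--       h = h+1
--   return {
--     "lowCount": l,
--     "mediumCount": m,
--     "highCount": h
--   }
-- ===== SOURCE B (Python) =====
-- from bisect import bisect_left, bisect_right
--
-- def count_batteries_by_usage(cycles):
--   s = sorted(cycles)
--   low = bisect_left(s, 150)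
--   medium = bisect_left(s, 649) - bisect_right(s, 150)
--   high = len(s) - bisect_right(s, 650)
--   return {
--     "lowCount": low,
--     "mediumCount": medium,
--     "highCount": high
--   }
-- ===== Notes on version B (the rewrite author's own statement) =====
-- stated objective: alternative
-- what changed: Replaces the per-element three-way counting loop by sort-then-bisect: counts for each bin are obtained by index arithmetic on the sorted list with bisect_left/bisect_right, reproducing the strict thresholds and the gaps at 150, 649 and 650 exactly.
import Mathlib
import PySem

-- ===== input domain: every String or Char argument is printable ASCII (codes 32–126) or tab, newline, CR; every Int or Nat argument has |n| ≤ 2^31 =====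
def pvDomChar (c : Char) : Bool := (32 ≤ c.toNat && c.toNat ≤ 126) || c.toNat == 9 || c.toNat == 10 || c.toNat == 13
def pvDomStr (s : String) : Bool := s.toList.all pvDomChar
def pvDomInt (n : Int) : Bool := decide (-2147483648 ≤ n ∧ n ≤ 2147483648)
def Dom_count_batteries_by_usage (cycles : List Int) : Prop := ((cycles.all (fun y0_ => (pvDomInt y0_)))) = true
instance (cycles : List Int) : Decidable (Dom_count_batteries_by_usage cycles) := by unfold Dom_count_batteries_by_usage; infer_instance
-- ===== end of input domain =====

-- B replaces A's per-element counting loop by sort-then-bisect index arithmetic (alternative decomposition, same results).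


-- ===== PORT A =====
def count_batteries_by_usage (cycles : List Int) : List (String × Int) :=
  let st := cycles.foldl (fun (acc : Int × Int × Int) i =>
      let l := if i < 150 then acc.1 + 1 else acc.1
      let m := if 150 < i then (if i < 649 then acc.2.1 + 1 else acc.2.1) else acc.2.1
      let h := if 650 < i then acc.2.2 + 1 else acc.2.2
      (l, m, h)) (0, 0, 0)
  [("lowCount", st.1), ("mediumCount", st.2.1), ("highCount", st.2.2)]

-- ===== PORT B =====
def count_batteries_by_usage_alt (cycles : List Int) : List (String × Int) :=
  let s := PySem.List.sorted cycles (fun x => x) false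
  let low : Int := (PySem.List.bisectLeft s 150 : Nat)
  let medium : Int := ((PySem.List.bisectLeft s 649 : Nat) : Int) - ((PySem.List.bisectRight s 150 : Nat) : Int)
  let high : Int := (s.length : Int) - ((PySem.List.bisectRight s 650 : Nat) : Int)
  [("lowCount", low), ("mediumCount", medium), ("highCount", high)]

-- ===== PRECONDITION & SPEC =====
def Spec_count_batteries_by_usage (cycles : List Int) (out : List (String × Int)) : Prop := out = count_batteries_by_usage_alt cycles
instance (cycles : List Int) (out : List (String × Int)) : Decidable (Spec_count_batteries_by_usage cycles out) := by unfold Spec_count_batteries_by_usage; infer_instance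

-- ===== CLAIM (what is proved, stated in full; the proofs are below) =====
def Claim_equal_count_batteries_by_usage : Prop := ∀ (cycles : List Int), Dom_count_batteries_by_usage cycles → Spec_count_batteries_by_usage cycles (count_batteries_by_usage cycles)

-- ===== LEMMAS AND PROOFS =====

-- On a sorted list, bisect_left x = number of elements < x.
lemma bisectLeft_eq_countP (s : List Int) (x : Int) (hs : s.Pairwise (· ≤ ·)) :
    PySem.List.bisectLeft s x = s.countP (fun y => decide (y < x)) := by
  obtain ⟨hle, hlt, hge⟩ := PySem.List.bisectLeft_spec s x hs
  set k := PySem.List.bisectLeft s x with hk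
  conv_rhs => rw [← List.take_append_drop k s]
  rw [List.countP_append]
  have h1 : (s.take k).countP (fun y => decide (y < x)) = (s.take k).length := by
    apply List.countP_eq_length.mpr
    intro a ha
    obtain ⟨i, hi, rfl⟩ := List.mem_take_iff_getElem.mp ha
    have h := hlt i (lt_min_iff.mp hi).2 (lt_min_iff.mp hi).1
    simpa using h
  have h2 : (s.drop k).countP (fun y => decide (y < x)) = 0 := by
    apply List.countP_eq_zero.mpr
    intro a ha
    obtain ⟨i, hi, rfl⟩ := List.mem_iff_getElem.mp ha
    rw [List.getElem_drop]
    have hlen : k + i < s.length := by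
      have := List.length_drop (l := s) (i := k); omega
    have := hge (k + i) hlen (by omega)
    simp; omega
  rw [h1, h2, List.length_take]
  omega

-- On a sorted list, bisect_right x = number of elements ≤ x.
lemma bisectRight_eq_countP (s : List Int) (x : Int) (hs : s.Pairwise (· ≤ ·)) :
    PySem.List.bisectRight s x = s.countP (fun y => decide (y ≤ x)) := by
  obtain ⟨hle, hlt, hge⟩ := PySem.List.bisectRight_spec s x hs
  set k := PySem.List.bisectRight s x with hk
  conv_rhs => rw [← List.take_append_drop k s]
  rw [List.countP_append]
  have h1 : (s.take k).countP (fun y => decide (y ≤ x)) = (s.take k).length := by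
    apply List.countP_eq_length.mpr
    intro a ha
    obtain ⟨i, hi, rfl⟩ := List.mem_take_iff_getElem.mp ha
    have h := hlt i (lt_min_iff.mp hi).2 (lt_min_iff.mp hi).1
    simpa using h
  have h2 : (s.drop k).countP (fun y => decide (y ≤ x)) = 0 := by
    apply List.countP_eq_zero.mpr
    intro a ha
    obtain ⟨i, hi, rfl⟩ := List.mem_iff_getElem.mp ha
    rw [List.getElem_drop]
    have hlen : k + i < s.length := by
      have := List.length_drop (l := s) (i := k); omega
    have := hge (k + i) hlen (by omega)
    simp; omega
  rw [h1, h2, List.length_take]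
  omega

-- A's loop computes the three countP's, starting from any accumulator.
lemma foldA_eq (xs : List Int) (l m h : Int) :
    xs.foldl (fun (acc : Int × Int × Int) i =>
      let l := if i < 150 then acc.1 + 1 else acc.1
      let m := if 150 < i then (if i < 649 then acc.2.1 + 1 else acc.2.1) else acc.2.1
      let h := if 650 < i then acc.2.2 + 1 else acc.2.2
      (l, m, h)) (l, m, h)
    = (l + (xs.countP (fun y => decide (y < 150)) : Nat),
       m + (xs.countP (fun y => decide (150 < y ∧ y < 649)) : Nat),
       h + (xs.countP (fun y => decide (650 < y)) : Nat)) := by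
  induction xs generalizing l m h with
  | nil => simp
  | cons a t ih =>
      simp only [List.foldl_cons, List.countP_cons, ih]
      refine Prod.ext ?_ (Prod.ext ?_ ?_) <;> simp <;> split_ifs <;> omega

-- countP (< 649) = countP (≤ 150) + countP (150 < · < 649), over integers.
lemma countP_med_split (xs : List Int) :
    xs.countP (fun y => decide (y < 649))
      = xs.countP (fun y => decide (y ≤ 150)) + xs.countP (fun y => decide (150 < y ∧ y < 649)) := by
  induction xs with
  | nil => simp
  | cons a t ih => simp only [List.countP_cons, ih]; split_ifs <;> simp_all <;> omega

-- length = countP (≤ 650) + countP (650 <).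
lemma countP_high_split (xs : List Int) :
    xs.length = xs.countP (fun y => decide (y ≤ 650)) + xs.countP (fun y => decide (650 < y)) := by
  induction xs with
  | nil => simp
  | cons a t ih => simp only [List.countP_cons, List.length_cons, ih]; split_ifs <;> simp_all <;> omega

-- ===== VERDICT (by name: the statement is the Claim_ definition above) =====
theorem count_batteries_by_usage_spec : Claim_equal_count_batteries_by_usage := by
  intro cycles _
  unfold Spec_count_batteries_by_usage count_batteries_by_usage count_batteries_by_usage_alt
  simp only []
  set s := PySem.List.sorted cycles (fun x => x) false with hsdef
  have hperm : s.Perm cycles := PySem.List.sorted_perm cycles (fun x => x) false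
  have hpsort : s.Pairwise (· ≤ ·) := by
    have := PySem.List.sorted_pairwise cycles (fun x => x)
    simpa using this
  have hcnt : ∀ p : Int → Bool, s.countP p = cycles.countP p := fun p => hperm.countP_eq p
  rw [foldA_eq]
  rw [bisectLeft_eq_countP s 150 hpsort, bisectLeft_eq_countP s 649 hpsort,
      bisectRight_eq_countP s 150 hpsort, bisectRight_eq_countP s 650 hpsort]
  have hlen : s.length = cycles.length := hperm.length_eq
  have hmed := countP_med_split s
  have hhigh := countP_high_split s
  simp only [hcnt] at *
  simp only [List.cons.injEq, Prod.mk.injEq, and_true]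
  exact ⟨⟨trivial, by omega⟩, ⟨trivial, by omega⟩, trivial, by omega⟩
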